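-- pv_equiv track=rewrite | github.com/doreiss-zwift/doreiss-zwift | AoC2021-11.py | do_flashing
-- ===== SOURCE A (Python) =====
-- def neighbors(i,j, N, M):
--     nbs = []
--     for (di,dj) in [(-1,-1), (-1, 0), (-1, 1), (0, -1), (0, 1), (1, -1), (1, 0), (1, 1)]:
--         (newI, newJ) = (i + di, j + dj)
--         if newI < N and newI >= 0 and newJ < M and newJ >= 0:
--             nbs.append((newI, newJ))
--     return nbs
--
-- def do_flashing(arr, flash_set, has_flashed, flash_counter, N, M):
--     new_flash_set = set()
--     for elem in flash_set:
--         if elem not in has_flashed: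
--             has_flashed.add(elem)
--             flash_counter += 1
--             for nb in neighbors(elem[0],elem[1], N, M):
--                 arr[nb[0]][nb[1]] += 1
--                 if arr[nb[0]][nb[1]] > 9:
--                     if nb not in flash_set and nb not in has_flashed:
--                         new_flash_set.add(nb)
--     return arr, new_flash_set, has_flashed, flash_counter
-- ===== SOURCE B (Python) =====
-- # B: phased re-implementation of one flash wave -- set-difference for the new flashers,
-- # a flat neighbor-event list, one running-tally threshold scan against the unmodified grid,
-- # then a single aggregated counts dict applied to arr. Mutates arr and has_flashed in place like A.
-- def neighbors(i, j, N, M):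
--     nbs = []
--     for (di, dj) in [(-1, -1), (-1, 0), (-1, 1), (0, -1), (0, 1), (1, -1), (1, 0), (1, 1)]:
--         (newI, newJ) = (i + di, j + dj)
--         if newI < N and newI >= 0 and newJ < M and newJ >= 0:
--             nbs.append((newI, newJ))
--     return nbs
--
-- def do_flashing(arr, flash_set, has_flashed, flash_counter, N, M):
--     actual = [e for e in flash_set if e not in has_flashed]
--     has_flashed.update(actual)
--     flash_counter += len(actual)
--     events = []
--     for e in actual:
--         events.extend(neighbors(e[0], e[1], N, M))
--     new_flash_set = set()
--     run = {}
--     for cb in events: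
--         v = run.get(cb, 0) + 1
--         run[cb] = v
--         if arr[cb[0]][cb[1]] + v > 9 and cb not in flash_set and cb not in has_flashed:
--             new_flash_set.add(cb)
--     counts = {}
--     for cb in events:
--         counts[cb] = counts.get(cb, 0) + 1
--     for (x, y), c in counts.items():
--         arr[x][y] += c
--     return arr, new_flash_set, has_flashed, flash_counter
-- ===== Notes on version B (the rewrite author's own statement) =====
-- stated objective: alternative
-- what changed: A interleaves mutation and detection: per flasher it mutates arr cell by cell and tests the threshold and membership inside doubly nested loops; B is a phased pipeline over different aggregates - a set-difference list of new flashers, a flat neighbor-event list, one running-tally threshold scan against the unmodified grid, and a counts dict applied to arr in one pass at the end.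
import Mathlib
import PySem

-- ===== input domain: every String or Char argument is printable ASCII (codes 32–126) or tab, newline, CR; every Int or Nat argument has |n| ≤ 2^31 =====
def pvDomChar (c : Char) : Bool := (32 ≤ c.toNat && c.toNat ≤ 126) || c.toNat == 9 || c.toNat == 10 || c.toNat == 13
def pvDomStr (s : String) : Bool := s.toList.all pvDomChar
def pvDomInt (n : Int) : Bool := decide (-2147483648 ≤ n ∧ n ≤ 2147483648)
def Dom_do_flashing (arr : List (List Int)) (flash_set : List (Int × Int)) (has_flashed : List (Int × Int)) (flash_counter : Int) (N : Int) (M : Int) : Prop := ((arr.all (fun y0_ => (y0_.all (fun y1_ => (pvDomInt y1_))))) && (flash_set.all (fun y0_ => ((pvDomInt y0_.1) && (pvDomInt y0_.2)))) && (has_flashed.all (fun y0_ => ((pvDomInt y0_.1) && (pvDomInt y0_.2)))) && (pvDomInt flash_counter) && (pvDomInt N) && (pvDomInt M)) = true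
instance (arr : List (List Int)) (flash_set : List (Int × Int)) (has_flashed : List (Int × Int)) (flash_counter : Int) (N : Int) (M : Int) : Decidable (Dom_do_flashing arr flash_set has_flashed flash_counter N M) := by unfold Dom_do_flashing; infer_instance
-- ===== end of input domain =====

-- B replaces A's interleaved mutate-and-test nested loops by a phased pipeline (set difference,
-- flat neighbor-event list, one threshold scan over base values, one aggregated counts dict);
-- equivalence is about the RETURN value (both Pythons mutate arr and has_flashed in place alike).

-- ===== PORT A =====
def pvOffsets : List (Int × Int) := [(-1,-1), (-1, 0), (-1, 1), (0, -1), (0, 1), (1, -1), (1, 0), (1, 1)]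

def neighbors (i : Int) (j : Int) (N : Int) (M : Int) : List (Int × Int) :=
  pvOffsets.foldl (fun nbs d =>
    if i + d.1 < N ∧ 0 ≤ i + d.1 ∧ j + d.2 < M ∧ 0 ≤ j + d.2
    then nbs ++ [(i + d.1, j + d.2)] else nbs) []

-- arr[p0][p1] += c  (in range under Pre_)
def pvBump (a : List (List Int)) (p : Int × Int) (c : Int) : List (List Int) :=
  a.modify p.1.toNat (fun row => row.modify p.2.toNat (· + c))

-- arr[p0][p1]  (in range under Pre_)
def pvCell (a : List (List Int)) (p : Int × Int) : Int :=
  (a.getD p.1.toNat []).getD p.2.toNat 0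

-- body of A's inner `for nb in neighbors(...)` loop
def pvFlashOne (fs chk : List (Int × Int)) (st : List (List Int) × List (Int × Int)) (nb : Int × Int) :
    List (List Int) × List (Int × Int) :=
  let a' := pvBump st.1 nb 1
  if pvCell a' nb > 9 then
    if nb ∉ fs ∧ nb ∉ chk then (a', PySem.Set.add st.2 nb) else (a', st.2)
  else (a', st.2)

-- body of A's outer `for elem in flash_set` loop; state = (arr, new_flash_set, has_flashed, flash_counter)
def pvOuterStep (fs : List (Int × Int)) (N M : Int)
    (st : List (List Int) × List (Int × Int) × List (Int × Int) × Int) (elem : Int × Int) :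
    List (List Int) × List (Int × Int) × List (Int × Int) × Int :=
  if elem ∈ st.2.2.1 then st
  else
    let hf' := PySem.Set.add st.2.2.1 elem
    let inner := (neighbors elem.1 elem.2 N M).foldl (pvFlashOne fs hf') (st.1, st.2.1)
    (inner.1, inner.2, hf', st.2.2.2 + 1)

def do_flashing (arr : List (List Int)) (flash_set : List (Int × Int)) (has_flashed : List (Int × Int)) (flash_counter : Int) (N : Int) (M : Int) : List (List Int) × (List (Int × Int)) × (List (Int × Int)) × Int :=
  flash_set.foldl (pvOuterStep flash_set N M) (arr, [], has_flashed, flash_counter)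

-- ===== PORT B =====
-- body of B's threshold scan: state = (run, new_flash_set), base values read from the untouched arr
def pvScanStep (base : List (List Int)) (fs chk : List (Int × Int))
    (st : PySem.Dict (Int × Int) Int × List (Int × Int)) (cb : Int × Int) :
    PySem.Dict (Int × Int) Int × List (Int × Int) :=
  let v := st.1.getD cb 0 + 1
  let run := st.1.insert cb v
  if pvCell base cb + v > 9 ∧ cb ∉ fs ∧ cb ∉ chk then (run, PySem.Set.add st.2 cb) else (run, st.2)

def do_flashing_alt (arr : List (List Int)) (flash_set : List (Int × Int)) (has_flashed : List (Int × Int)) (flash_counter : Int) (N : Int) (M : Int) : List (List Int) × (List (Int × Int)) × (List (Int × Int)) × Int :=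
  let actual := PySem.Set.ofList (flash_set.filter (fun e => decide (e ∉ has_flashed)))
  let hf2 := actual.foldl PySem.Set.add has_flashed
  let fc2 := flash_counter + actual.length
  let events := actual.foldl (fun ev e => ev ++ neighbors e.1 e.2 N M) []
  let nfs := (events.foldl (pvScanStep arr flash_set hf2) (PySem.Dict.empty, [])).2
  let counts := events.foldl (fun d cb => d.insert cb (d.getD cb 0 + 1)) PySem.Dict.empty
  let arr2 := counts.items.foldl (fun a p => pvBump a p.1 p.2) arr
  (arr2, nfs, hf2, fc2)

-- ===== PRECONDITION & SPEC =====
-- Pre_ = exactly the inputs where A's grid accesses stay inside arr (outside it Python A raises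
-- IndexError on arr[nb[0]][nb[1]]; Python B raises there too).
def Pre_do_flashing (arr : List (List Int)) (flash_set : List (Int × Int)) (has_flashed : List (Int × Int)) (flash_counter : Int) (N : Int) (M : Int) : Prop :=
  ∀ e ∈ flash_set, e ∉ has_flashed →
    ∀ d ∈ ([(-1,-1), (-1, 0), (-1, 1), (0, -1), (0, 1), (1, -1), (1, 0), (1, 1)] : List (Int × Int)),
      e.1 + d.1 < N → 0 ≤ e.1 + d.1 → e.2 + d.2 < M → 0 ≤ e.2 + d.2 →
        (e.1 + d.1).toNat < arr.length ∧ (e.2 + d.2).toNat < (arr.getD (e.1 + d.1).toNat []).length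
instance (arr : List (List Int)) (flash_set : List (Int × Int)) (has_flashed : List (Int × Int)) (flash_counter : Int) (N : Int) (M : Int) : Decidable (Pre_do_flashing arr flash_set has_flashed flash_counter N M) := by unfold Pre_do_flashing; infer_instance

def pvWitness_do_flashing : List (List Int) × (List (Int × Int)) × (List (Int × Int)) × Int × Int × Int :=
  ([[9, 9, 9], [9, 5, 9], [9, 9, 9]], ([(1, 1)], ([], (0, (3, 3)))))

def Spec_do_flashing (arr : List (List Int)) (flash_set : List (Int × Int)) (has_flashed : List (Int × Int)) (flash_counter : Int) (N : Int) (M : Int) (out : List (List Int) × (List (Int × Int)) × (List (Int × Int)) × Int) : Prop := out = do_flashing_alt arr flash_set has_flashed flash_counter N M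
instance (arr : List (List Int)) (flash_set : List (Int × Int)) (has_flashed : List (Int × Int)) (flash_counter : Int) (N : Int) (M : Int) (out : List (List Int) × (List (Int × Int)) × (List (Int × Int)) × Int) : Decidable (Spec_do_flashing arr flash_set has_flashed flash_counter N M out) := by unfold Spec_do_flashing; infer_instance

-- ===== CLAIM (what is proved, stated in full; the proofs are below) =====
def Claim_equal_do_flashing : Prop := ∀ (arr : List (List Int)) (flash_set : List (Int × Int)) (has_flashed : List (Int × Int)) (flash_counter : Int) (N : Int) (M : Int), Dom_do_flashing arr flash_set has_flashed flash_counter N M → Pre_do_flashing arr flash_set has_flashed flash_counter N M → Spec_do_flashing arr flash_set has_flashed flash_counter N M (do_flashing arr flash_set has_flashed flash_counter N M)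

-- ===== LEMMAS AND PROOFS =====

-- the elements of l that A actually processes: first occurrences not already in h
def pvNew (h l : List (Int × Int)) : List (Int × Int) :=
  match l with
  | [] => []
  | e :: l' => if e ∈ h then pvNew h l' else e :: pvNew (h ++ [e]) l'

theorem mem_pvNew {h l : List (Int × Int)} {x : Int × Int} (hx : x ∈ pvNew h l) : x ∈ l ∧ x ∉ h := by
  induction l generalizing h with
  | nil => simp [pvNew] at hx
  | cons e l' ih =>
    simp only [pvNew] at hx
    split at hx
    · rcases ih hx with ⟨h1, h2⟩; exact ⟨by simp [h1], h2⟩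
    · rcases List.mem_cons.1 hx with rfl | hx'
      · exact ⟨by simp, by assumption⟩
      · rcases ih hx' with ⟨h1, h2⟩
        exact ⟨by simp [h1], fun hc => h2 (by simp [hc])⟩

theorem nodup_pvNew (h l : List (Int × Int)) : (pvNew h l).Nodup := by
  induction l generalizing h with
  | nil => simp [pvNew]
  | cons e l' ih =>
    simp only [pvNew]
    split
    · exact ih h
    · refine List.nodup_cons.2 ⟨fun hc => ?_, ih (h ++ [e])⟩
      exact (mem_pvNew hc).2 (by simp)

theorem foldl_add_pvNew (l : List (Int × Int)) : ∀ h, l.foldl PySem.Set.add h = h ++ pvNew h l := by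
  induction l with
  | nil => intro h; simp [pvNew]
  | cons e l' ih =>
    intro h
    simp only [List.foldl_cons, pvNew]
    by_cases he : e ∈ h
    · rw [PySem.Set.add_of_mem he, if_pos he, ih]
    · rw [PySem.Set.add_of_not_mem he, if_neg he, ih, List.append_assoc]
      rfl

theorem pvNew_filter_shift (l : List (Int × Int)) :
    ∀ (g g' h : List (Int × Int)), (∀ x ∈ l, x ∈ g' ↔ (x ∈ h ∨ x ∈ g)) →
    pvNew g (l.filter (fun e => decide (e ∉ h))) = pvNew g' l := by
  induction l with
  | nil => intro g g' h _; rfl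
  | cons e l' ih =>
    intro g g' h hiff
    by_cases he : e ∈ h
    · have heg' : e ∈ g' := (hiff e (by simp)).2 (Or.inl he)
      rw [List.filter_cons_of_neg (by simpa using he)]
      rw [show pvNew g' (e :: l') = pvNew g' l' from by simp [pvNew, heg']]
      exact ih g g' h (fun x hx => hiff x (by simp [hx]))
    · rw [List.filter_cons_of_pos (by simpa using he)]
      by_cases hg : e ∈ g
      · have heg' : e ∈ g' := (hiff e (by simp)).2 (Or.inr hg)
        rw [show pvNew g (e :: l'.filter (fun e => decide (e ∉ h)))
              = pvNew g (l'.filter (fun e => decide (e ∉ h))) from by simp [pvNew, hg]]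
        rw [show pvNew g' (e :: l') = pvNew g' l' from by simp [pvNew, heg']]
        exact ih g g' h (fun x hx => hiff x (by simp [hx]))
      · have heg' : e ∉ g' := fun hc => by
          rcases (hiff e (by simp)).1 hc with h1 | h1
          · exact he h1
          · exact hg h1
        rw [show pvNew g (e :: l'.filter (fun e => decide (e ∉ h)))
              = e :: pvNew (g ++ [e]) (l'.filter (fun e => decide (e ∉ h))) from by
            simp [pvNew, hg]]
        rw [show pvNew g' (e :: l') = e :: pvNew (g' ++ [e]) l' from by simp [pvNew, heg']]
        congr 1
        apply ih (g ++ [e]) (g' ++ [e]) h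
        intro x hx
        constructor
        · intro hm
          rcases List.mem_append.1 hm with hm | hm
          · rcases (hiff x (by simp [hx])).1 hm with h1 | h1
            · exact Or.inl h1
            · exact Or.inr (by simp [h1])
          · exact Or.inr (by simp_all)
        · intro hm
          rcases hm with h1 | h1
          · exact List.mem_append.2 (Or.inl ((hiff x (by simp [hx])).2 (Or.inl h1)))
          · rcases List.mem_append.1 h1 with h2 | h2
            · exact List.mem_append.2 (Or.inl ((hiff x (by simp [hx])).2 (Or.inr h2)))
            · exact List.mem_append.2 (Or.inr h2)

-- B's actual = elements A actually processes
theorem ofList_filter_eq_pvNew (l h : List (Int × Int)) :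
    PySem.Set.ofList (l.filter (fun e => decide (e ∉ h))) = pvNew h l := by
  rw [PySem.Set.ofList_eq_foldl, foldl_add_pvNew, List.nil_append]
  exact pvNew_filter_shift l [] h h (fun x _ => by simp)

theorem pvNew_self (l h : List (Int × Int)) (hn : l.Nodup) (hh : ∀ x ∈ l, x ∉ h) :
    pvNew h l = l := by
  induction l generalizing h with
  | nil => rfl
  | cons e l' ih =>
    simp only [pvNew, if_neg (hh e (by simp))]
    congr 1
    exact ih (h ++ [e]) (List.nodup_cons.1 hn).2
      (fun x hx => by
        simp only [List.mem_append, List.mem_singleton]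
        rintro (hc | rfl)
        · exact hh x (by simp [hx]) hc
        · exact (List.nodup_cons.1 hn).1 hx)

-- shape lemmas
theorem length_pvBump (a : List (List Int)) (p : Int × Int) (c : Int) : (pvBump a p c).length = a.length := by
  simp [pvBump]

theorem row_modify_getD (row : List Int) (m : Nat) (c : Int) (h : m < row.length) :
    (row.modify m (· + c)).getD m 0 = row.getD m 0 + c := by
  simp only [List.getD_eq_getElem?_getD, List.getElem?_modify_eq, List.getElem?_eq_getElem h]
  rfl

theorem rowlen_pvBump (a : List (List Int)) (p : Int × Int) (c : Int) (i : Nat) :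
    ((pvBump a p c).getD i []).length = ((a.getD i []).length) := by
  simp only [pvBump, List.getD_eq_getElem?_getD]
  by_cases h : p.1.toNat = i
  · subst h
    rw [List.getElem?_modify_eq]
    rcases ha : a[p.1.toNat]? with _ | row
    · rfl
    · simp [List.length_modify]
  · rw [List.getElem?_modify_ne _ _ h]

theorem row_pvBump_self (a : List (List Int)) (p : Int × Int) (c : Int) (h1 : p.1.toNat < a.length) :
    (pvBump a p c).getD p.1.toNat [] = (a.getD p.1.toNat []).modify p.2.toNat (· + c) := by
  simp only [pvBump, List.getD_eq_getElem?_getD, List.getElem?_modify_eq,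
    List.getElem?_eq_getElem h1]
  rfl

theorem cell_pvBump_self (a : List (List Int)) (p : Int × Int) (c : Int)
    (h1 : p.1.toNat < a.length) (h2 : p.2.toNat < (a.getD p.1.toNat []).length) :
    pvCell (pvBump a p c) p = pvCell a p + c := by
  unfold pvCell
  rw [row_pvBump_self a p c h1]
  exact row_modify_getD _ _ _ h2

theorem cell_pvBump_ne (a : List (List Int)) (p q : Int × Int) (c : Int)
    (h : p.1.toNat ≠ q.1.toNat ∨ p.2.toNat ≠ q.2.toNat) :
    pvCell (pvBump a q c) p = pvCell a p := by
  unfold pvCell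
  by_cases hr : q.1.toNat = p.1.toNat
  · have hcol : q.2.toNat ≠ p.2.toNat := by
      rcases h with h | h
      · exact absurd hr.symm h
      · exact fun hc => h hc.symm
    have hrow : (pvBump a q c).getD p.1.toNat [] = (a.getD p.1.toNat []).modify q.2.toNat (· + c) := by
      simp only [pvBump, List.getD_eq_getElem?_getD, hr, List.getElem?_modify_eq]
      rcases ha : a[p.1.toNat]? with _ | row <;> simp
    rw [hrow, List.getD_eq_getElem?_getD, List.getElem?_modify_ne _ _ hcol,
      ← List.getD_eq_getElem?_getD]
  · simp only [pvBump, List.getD_eq_getElem?_getD, List.getElem?_modify_ne _ _ hr]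

theorem pvBump_pvBump_self (a : List (List Int)) (p : Int × Int) (c d : Int) :
    pvBump (pvBump a p c) p d = pvBump a p (c + d) := by
  simp only [pvBump]
  rw [List.modify_modify_eq]
  congr 1
  funext row
  simp only [Function.comp_apply]
  rw [List.modify_modify_eq]
  congr 1
  funext x
  simp only [Function.comp_apply]
  ring

theorem pvBump_comm (a : List (List Int)) (p q : Int × Int) (c d : Int) :
    pvBump (pvBump a p c) q d = pvBump (pvBump a q d) p c := by
  simp only [pvBump]
  by_cases hr : p.1.toNat = q.1.toNat
  · rw [hr, List.modify_modify_eq, List.modify_modify_eq]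
    congr 1
    funext row
    simp only [Function.comp_apply]
    by_cases hc : p.2.toNat = q.2.toNat
    · rw [hc, List.modify_modify_eq, List.modify_modify_eq]
      congr 1
      funext x
      simp only [Function.comp_apply]
      ring
    · rw [List.modify_modify_ne _ _ _ hc]
  · rw [List.modify_modify_ne _ _ _ hr]

-- neighbors membership characterisation
theorem neighbors_eq (i j N M : Int) :
    neighbors i j N M = (pvOffsets.filter (fun d =>
      decide (i + d.1 < N ∧ 0 ≤ i + d.1 ∧ j + d.2 < M ∧ 0 ≤ j + d.2))).map
      (fun d => (i + d.1, j + d.2)) := by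
  unfold neighbors
  rw [PySem.List.foldl_append_ite]
  rfl

theorem mem_neighbors {i j N M : Int} {cb : Int × Int} (h : cb ∈ neighbors i j N M) :
    ∃ d ∈ pvOffsets, cb = (i + d.1, j + d.2) ∧ i + d.1 < N ∧ 0 ≤ i + d.1 ∧ j + d.2 < M ∧ 0 ≤ j + d.2 := by
  rw [neighbors_eq] at h
  rcases List.mem_map.1 h with ⟨d, hd, rfl⟩
  rcases List.mem_filter.1 hd with ⟨hd1, hd2⟩
  exact ⟨d, hd1, rfl, by simpa using of_decide_eq_true hd2⟩

-- check-set congruence for the two folds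
theorem flashOne_congr (fs h1 h2 : List (Int × Int)) (evs : List (Int × Int))
    (st : List (List Int) × List (Int × Int))
    (hh : ∀ cb : Int × Int, cb ∉ fs → (cb ∈ h1 ↔ cb ∈ h2)) :
    evs.foldl (pvFlashOne fs h1) st = evs.foldl (pvFlashOne fs h2) st := by
  apply PySem.List.foldl_congr_mem
  intro st cb _
  unfold pvFlashOne
  by_cases hc : pvCell (pvBump st.1 cb 1) cb > 9
  · rw [if_pos hc, if_pos hc]
    by_cases hm : cb ∈ fs
    · rw [if_neg (by tauto), if_neg (by tauto)]
    · rw [if_congr (iff_of_eq (congrArg _ rfl)) rfl rfl]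
      by_cases hcb : cb ∈ h1
      · rw [if_neg (by intro hx; exact hx.2 hcb), if_neg (by intro hx; exact hx.2 ((hh cb hm).1 hcb))]
      · rw [if_pos ⟨hm, hcb⟩, if_pos ⟨hm, fun hx => hcb ((hh cb hm).2 hx)⟩]
  · rw [if_neg hc, if_neg hc]

theorem scanStep_congr (base : List (List Int)) (fs h1 h2 : List (Int × Int)) (evs : List (Int × Int))
    (st : PySem.Dict (Int × Int) Int × List (Int × Int))
    (hh : ∀ cb : Int × Int, cb ∉ fs → (cb ∈ h1 ↔ cb ∈ h2)) :
    evs.foldl (pvScanStep base fs h1) st = evs.foldl (pvScanStep base fs h2) st := by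
  apply PySem.List.foldl_congr_mem
  intro st cb _
  unfold pvScanStep
  by_cases hm : cb ∈ fs
  · rw [if_neg (by tauto), if_neg (by tauto)]
  · by_cases hcb : cb ∈ h1
    · rw [if_neg (by intro hx; exact hx.2.2 hcb), if_neg (by intro hx; exact hx.2.2 ((hh cb hm).1 hcb))]
    · by_cases hv : pvCell base cb + (st.1.getD cb 0 + 1) > 9
      · rw [if_pos ⟨hv, hm, hcb⟩, if_pos ⟨hv, hm, fun hx => hcb ((hh cb hm).2 hx)⟩]
      · rw [if_neg (by tauto), if_neg (by tauto)]

-- inner loop spec: A's interleaved bump-and-test fold = (all bumps, threshold scan over base values)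
theorem flashOne_fold_spec (fs chk : List (Int × Int)) (base : List (List Int)) :
    ∀ (evs : List (Int × Int)) (a : List (List Int)) (s : List (Int × Int)) (r : PySem.Dict (Int × Int) Int),
    a.length = base.length →
    (∀ i : Nat, (a.getD i []).length = (base.getD i []).length) →
    (∀ cb ∈ evs, 0 ≤ cb.1 ∧ 0 ≤ cb.2 ∧ cb.1.toNat < base.length ∧ cb.2.toNat < (base.getD cb.1.toNat []).length) →
    (∀ cb ∈ evs, pvCell a cb = pvCell base cb + r.getD cb 0) →
    evs.foldl (pvFlashOne fs chk) (a, s) =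
      (evs.foldl (fun x cb => pvBump x cb 1) a, (evs.foldl (pvScanStep base fs chk) (r, s)).2) := by
  intro evs
  induction evs with
  | nil => intro a s r _ _ _ _; rfl
  | cons cb evs ih =>
    intro a s r hlen hrow hrng hinv
    obtain ⟨hnn1, hnn2, hb1, hb2⟩ := hrng cb (by simp)
    have ha1 : cb.1.toNat < a.length := by rw [hlen]; exact hb1
    have ha2 : cb.2.toNat < (a.getD cb.1.toNat []).length := by rw [hrow]; exact hb2
    have hx : pvCell (pvBump a cb 1) cb = pvCell base cb + (r.getD cb 0 + 1) := by
      rw [cell_pvBump_self a cb 1 ha1 ha2, hinv cb (by simp)]; ring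
    simp only [List.foldl_cons]
    -- reduce one step on each side
    have hstepA : pvFlashOne fs chk (a, s) cb =
        (pvBump a cb 1, if pvCell base cb + (r.getD cb 0 + 1) > 9 ∧ cb ∉ fs ∧ cb ∉ chk
          then PySem.Set.add s cb else s) := by
      simp only [pvFlashOne, hx]
      by_cases h1 : pvCell base cb + (r.getD cb 0 + 1) > 9
      · rw [if_pos h1]
        by_cases h2 : cb ∉ fs ∧ cb ∉ chk
        · rw [if_pos h2, if_pos ⟨h1, h2⟩]
        · rw [if_neg h2, if_neg (fun hc => h2 hc.2)]
      · rw [if_neg h1, if_neg (fun hc => h1 hc.1)]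
    have hstepB : pvScanStep base fs chk (r, s) cb =
        (r.insert cb (r.getD cb 0 + 1),
         if pvCell base cb + (r.getD cb 0 + 1) > 9 ∧ cb ∉ fs ∧ cb ∉ chk
          then PySem.Set.add s cb else s) := by
      simp only [pvScanStep]
      by_cases h : pvCell base cb + (r.getD cb 0 + 1) > 9 ∧ cb ∉ fs ∧ cb ∉ chk
      · rw [if_pos h, if_pos h]
      · rw [if_neg h, if_neg h]
    rw [hstepA, hstepB]
    apply ih (pvBump a cb 1) _ (r.insert cb (r.getD cb 0 + 1))
    · rw [length_pvBump]; exact hlen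
    · intro i; rw [rowlen_pvBump]; exact hrow i
    · intro c hc; exact hrng c (by simp [hc])
    · intro c hc
      by_cases hq : c = cb
      · subst hq
        rw [cell_pvBump_self a c 1 ha1 ha2, hinv c (by simp), PySem.Dict.getD_insert_self]
        ring
      · obtain ⟨hn1, hn2, _, _⟩ := hrng c (by simp [hc])
        have hne : c.1.toNat ≠ cb.1.toNat ∨ c.2.toNat ≠ cb.2.toNat := by
          by_cases h1 : c.1 = cb.1
          · right
            have h2 : c.2 ≠ cb.2 := fun h2 => hq (Prod.ext h1 h2)
            omega
          · left; omega
        rw [cell_pvBump_ne a c cb 1 hne, hinv c (by simp [hc]),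
          PySem.Dict.getD_insert_of_ne _ _ _ hq]

theorem bump_foldl_comm (L : List ((Int × Int) × Int)) :
    ∀ (a : List (List Int)) (x : Int × Int) (c : Int),
    L.foldl (fun y p => pvBump y p.1 p.2) (pvBump a x c)
      = pvBump (L.foldl (fun y p => pvBump y p.1 p.2) a) x c := by
  induction L with
  | nil => intro a x c; rfl
  | cons p L ih =>
    intro a x c
    simp only [List.foldl_cons]
    rw [pvBump_comm, ih]

-- counting dict applied at the end = unit bumps applied along the way
theorem counts_apply_spec (E : List (Int × Int)) (a : List (List Int)) :
    (E.foldl (fun d cb => d.insert cb (d.getD cb 0 + 1)) (PySem.Dict.empty : PySem.Dict (Int × Int) Int)).items.foldl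
      (fun x p => pvBump x p.1 p.2) a
    = E.foldl (fun x cb => pvBump x cb 1) a := by
  induction E using List.reverseRecOn generalizing a with
  | nil => rfl
  | append_singleton E x ih =>
    rw [List.foldl_append, List.foldl_append]
    simp only [List.foldl_cons, List.foldl_nil]
    set D := E.foldl (fun d cb => d.insert cb (d.getD cb 0 + 1))
      (PySem.Dict.empty : PySem.Dict (Int × Int) Int) with hD
    have hK : D.keys.Nodup := PySem.Dict.nodup_keys_foldl_insert E _ _ (by simp)
    by_cases hc : D.contains x = true
    · -- x already a key: its value goes from v to v + 1, one extra bump at x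
      have hxk : x ∈ D.keys := (PySem.Dict.contains_iff_mem_keys D x).1 hc
      rcases List.mem_map.1 hxk with ⟨p, hp, hfst⟩
      obtain ⟨pk, pv⟩ := p
      simp only at hfst
      rw [hfst] at hp
      rcases List.append_of_mem hp with ⟨L1, L2, hsplit⟩
      have hval : D.getD x 0 = pv := PySem.Dict.getD_of_mem_items D hp hK 0
      have hkeys : ((L1 ++ (x, pv) :: L2).map Prod.fst).Nodup := by rw [← hsplit]; exact hK
      have hL1 : ∀ q ∈ L1, q.1 ≠ x := by
        intro q hq hxq
        simp only [List.map_append, List.map_cons, List.nodup_append] at hkeys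
        exact hkeys.2.2 q.1 (List.mem_map_of_mem hq) x (by simp) hxq
      have hL2 : ∀ q ∈ L2, q.1 ≠ x := by
        intro q hq hxq
        simp only [List.map_append, List.map_cons, List.nodup_append] at hkeys
        exact (List.nodup_cons.1 hkeys.2.1).1 (by rw [← hxq]; exact List.mem_map_of_mem hq)
      have hitems : (D.insert x (D.getD x 0 + 1)).items = L1 ++ (x, pv + 1) :: L2 := by
        have hmapL1 : L1.map (fun p => if (p.1 == x) = true then (x, pv + 1) else p) = L1 := by
          rw [show L1.map (fun p => if (p.1 == x) = true then (x, pv + 1) else p) = L1.map id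
              from List.map_congr_left (fun q hq => by
                rw [if_neg (fun hb => hL1 q hq (by simpa using hb))]; rfl), List.map_id]
        have hmapL2 : L2.map (fun p => if (p.1 == x) = true then (x, pv + 1) else p) = L2 := by
          rw [show L2.map (fun p => if (p.1 == x) = true then (x, pv + 1) else p) = L2.map id
              from List.map_congr_left (fun q hq => by
                rw [if_neg (fun hb => hL2 q hq (by simpa using hb))]; rfl), List.map_id]
        rw [PySem.Dict.items_insert_of_contains D _ hc, hsplit, hval]
        rw [List.map_append, List.map_cons, hmapL1, hmapL2, if_pos (by simp)]
      rw [hitems, List.foldl_append]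
      simp only [List.foldl_cons]
      rw [show pvBump (L1.foldl (fun x p => pvBump x p.1 p.2) a) x (pv + 1)
           = pvBump (pvBump (L1.foldl (fun x p => pvBump x p.1 p.2) a) x pv) x 1
          from (pvBump_pvBump_self _ _ _ _).symm]
      rw [bump_foldl_comm]
      congr 1
      rw [← ih a, hsplit, List.foldl_append]
      simp only [List.foldl_cons]
    · rw [PySem.Dict.items_insert_of_not_contains D _ (by simpa using hc), List.foldl_append,
        PySem.Dict.getD_of_not_contains D _ (by simpa using hc)]
      simp only [List.foldl_cons, List.foldl_nil, zero_add]
      rw [ih]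

-- outer loop spec
theorem outer_fold_spec (fs0 hf0 : List (Int × Int)) (N M : Int) :
    ∀ (l : List (Int × Int)) (a : List (List Int)) (s h : List (Int × Int)) (c : Int),
    (∀ e ∈ l, e ∈ fs0) → (∀ x : Int × Int, x ∉ fs0 → (x ∈ h ↔ x ∈ hf0)) →
    l.foldl (pvOuterStep fs0 N M) (a, s, h, c) =
      ((((pvNew h l).flatMap (fun e => neighbors e.1 e.2 N M)).foldl (pvFlashOne fs0 hf0) (a, s)).1,
       (((pvNew h l).flatMap (fun e => neighbors e.1 e.2 N M)).foldl (pvFlashOne fs0 hf0) (a, s)).2,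
       h ++ pvNew h l,
       c + (pvNew h l).length) := by
  intro l
  induction l with
  | nil => intro a s h c _ _; simp [pvNew]
  | cons e l' ih =>
    intro a s h c hl hh
    simp only [List.foldl_cons]
    by_cases he : e ∈ h
    · rw [show pvOuterStep fs0 N M (a, s, h, c) e = (a, s, h, c) from by
        simp [pvOuterStep, he]]
      rw [show pvNew h (e :: l') = pvNew h l' from by simp [pvNew, he]]
      exact ih a s h c (fun x hx => hl x (by simp [hx])) hh
    · have hstep : pvOuterStep fs0 N M (a, s, h, c) e =
          (((neighbors e.1 e.2 N M).foldl (pvFlashOne fs0 (h ++ [e])) (a, s)).1,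
           ((neighbors e.1 e.2 N M).foldl (pvFlashOne fs0 (h ++ [e])) (a, s)).2,
           h ++ [e], c + 1) := by
        simp only [pvOuterStep, if_neg he, PySem.Set.add_of_not_mem he]
      rw [hstep]
      have hcongr : (neighbors e.1 e.2 N M).foldl (pvFlashOne fs0 (h ++ [e])) (a, s)
          = (neighbors e.1 e.2 N M).foldl (pvFlashOne fs0 hf0) (a, s) := by
        apply flashOne_congr
        intro cb hcb
        have hne : cb ≠ e := fun hc => hcb (hc ▸ hl e (by simp))
        constructor
        · intro hm
          rcases List.mem_append.1 hm with hm | hm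
          · exact (hh cb hcb).1 hm
          · exact absurd (by simpa using hm) hne
        · intro hm; exact List.mem_append.2 (Or.inl ((hh cb hcb).2 hm))
      rw [hcongr]
      have hh' : ∀ x : Int × Int, x ∉ fs0 → (x ∈ h ++ [e] ↔ x ∈ hf0) := by
        intro x hx
        have hne : x ≠ e := fun hc => hx (hc ▸ hl e (by simp))
        constructor
        · intro hm
          rcases List.mem_append.1 hm with hm | hm
          · exact (hh x hx).1 hm
          · exact absurd (by simpa using hm) hne
        · intro hm; exact List.mem_append.2 (Or.inl ((hh x hx).2 hm))
      rw [ih _ _ (h ++ [e]) (c + 1) (fun x hx => hl x (by simp [hx])) hh']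
      rw [show pvNew h (e :: l') = e :: pvNew (h ++ [e]) l' from by simp [pvNew, he]]
      simp only [List.flatMap_cons, List.foldl_append, List.length_cons, List.append_assoc,
        List.singleton_append, Prod.mk.eta, Prod.mk.injEq]
      refine ⟨trivial, trivial, trivial, by push_cast; ring⟩

-- ===== VERDICT (by name: the statement is the Claim_ definition above) =====
theorem do_flashing_spec : Claim_equal_do_flashing := by
  intro arr fs hf fc N M _ hpre
  unfold Spec_do_flashing
  have hact_sub : ∀ x ∈ pvNew hf fs, x ∈ fs ∧ x ∉ hf := fun x hx => mem_pvNew hx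
  have hhf2 : (pvNew hf fs).foldl PySem.Set.add hf = hf ++ pvNew hf fs := by
    rw [foldl_add_pvNew, pvNew_self _ _ (nodup_pvNew hf fs) (fun x hx => (hact_sub x hx).2)]
  have hchk : ∀ cb : Int × Int, cb ∉ fs → (cb ∈ hf ++ pvNew hf fs ↔ cb ∈ hf) := by
    intro cb hcb
    constructor
    · intro hm
      rcases List.mem_append.1 hm with hm | hm
      · exact hm
      · exact absurd (hact_sub cb hm).1 hcb
    · intro hm; exact List.mem_append.2 (Or.inl hm)
  have hrng : ∀ cb ∈ (pvNew hf fs).flatMap (fun e => neighbors e.1 e.2 N M),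
      0 ≤ cb.1 ∧ 0 ≤ cb.2 ∧ cb.1.toNat < arr.length ∧
        cb.2.toNat < (arr.getD cb.1.toNat []).length := by
    intro cb hcb
    rcases List.mem_flatMap.1 hcb with ⟨e, he, hnb⟩
    obtain ⟨hef, heh⟩ := hact_sub e he
    rcases mem_neighbors hnb with ⟨d, hd, rfl, hb1, hb2, hb3, hb4⟩
    unfold pvOffsets at hd
    obtain ⟨hr1, hr2⟩ := hpre e hef heh d hd hb1 hb2 hb3 hb4
    exact ⟨hb2, hb4, hr1, hr2⟩
  have hA : do_flashing arr fs hf fc N M =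
      (((pvNew hf fs).flatMap (fun e => neighbors e.1 e.2 N M)).foldl (fun x cb => pvBump x cb 1) arr,
       (((pvNew hf fs).flatMap (fun e => neighbors e.1 e.2 N M)).foldl
          (pvScanStep arr fs hf) (PySem.Dict.empty, [])).2,
       hf ++ pvNew hf fs,
       fc + (pvNew hf fs).length) := by
    unfold do_flashing
    rw [outer_fold_spec fs hf N M fs arr [] hf fc (fun e he => he) (fun x _ => Iff.rfl)]
    rw [flashOne_fold_spec fs hf arr _ arr [] PySem.Dict.empty rfl (fun _ => rfl) hrng
      (by intro cb _; rw [PySem.Dict.getD_empty]; ring)]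
  have hB : do_flashing_alt arr fs hf fc N M =
      (((pvNew hf fs).flatMap (fun e => neighbors e.1 e.2 N M)).foldl (fun x cb => pvBump x cb 1) arr,
       (((pvNew hf fs).flatMap (fun e => neighbors e.1 e.2 N M)).foldl
          (pvScanStep arr fs hf) (PySem.Dict.empty, [])).2,
       hf ++ pvNew hf fs,
       fc + (pvNew hf fs).length) := by
    simp only [do_flashing_alt]
    rw [ofList_filter_eq_pvNew, hhf2, PySem.List.foldl_append_eq_flatMap, List.nil_append,
      counts_apply_spec,
      scanStep_congr arr fs (hf ++ pvNew hf fs) hf _ _ hchk]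
  rw [hA, hB]
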